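-- pv_equiv track=rewrite | github.com/Magdas10/iponweb | src/homeworks/Homework4/homework4.py | hTol
-- ===== SOURCE A (Python) =====
-- def hTol(lst):
--     d = dict()
--     ln = len(lst[0])
--     rank = []
--     for l in range(ln):
--         rank.append([])
--     for l in rank:
--         for i in range(ln):
--             l.append(0)
--     pair = list(zip(sorted(lst[0]), rank))
--     for l in lst:
--         for i in range(ln):
--             for j in range(ln):
--                 if l[i] == pair[j][0]:
--                     pair[j][1][i] += 1
--     result = ''
--     for i in range(ln):
--         maxE = 0
--         for j in range(1, ln):
--             if pair[j][1][i] > pair[maxE][1][i]: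
--                 maxE = j
--         result += pair[maxE][0]
--     return result
-- ===== SOURCE B (Python) =====
-- def hTol(lst):
--     cand = sorted(set(lst[0]))
--     candset = set(cand)
--     out = []
--     for i in range(len(lst[0])):
--         # sort the column (restricted to candidate chars, seeded with one copy of
--         # each candidate so every candidate appears) and take the longest run;
--         # sorting makes the first maximal run the alphabetically smallest winner
--         col = sorted(cand + [row[i] for row in lst if row[i] in candset])
--         best, best_len = col[0], 0
--         cur, cur_len = col[0], 0
--         for ch in col:
--             if ch == cur:
--                 cur_len += 1
--             else:
--                 cur, cur_len = ch, 1
--             if cur_len > best_len: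
--                 best, best_len = cur, cur_len
--         out.append(best)
--     return ''.join(out)
-- ===== Notes on version B (the rewrite author's own statement) =====
-- stated objective: faster
-- what changed: A fills a global char-by-column count matrix with three nested index loops over zip(sorted(lst[0]), rank) and hand-rolls an index argmax per column; B never counts at all: per column it sorts the column's candidate characters (seeded with one copy of each candidate of lst[0], which shifts every count by one uniformly) and takes the longest run in one linear scan -- sorting makes equal characters contiguous and makes the first maximal run the alphabetically smallest, reproducing A's tie-break.
import Mathlib
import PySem

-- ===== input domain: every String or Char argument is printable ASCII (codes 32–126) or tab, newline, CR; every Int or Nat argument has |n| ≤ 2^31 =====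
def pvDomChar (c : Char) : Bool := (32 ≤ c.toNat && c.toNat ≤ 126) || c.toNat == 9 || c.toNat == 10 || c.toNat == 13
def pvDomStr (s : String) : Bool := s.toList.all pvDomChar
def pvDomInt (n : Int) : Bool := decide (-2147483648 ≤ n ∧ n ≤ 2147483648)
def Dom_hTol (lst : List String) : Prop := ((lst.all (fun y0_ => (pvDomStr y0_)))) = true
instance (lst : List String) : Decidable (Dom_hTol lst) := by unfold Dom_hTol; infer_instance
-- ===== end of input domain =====

-- B replaces A's global char×column count matrix + hand-rolled argmax by sorting each column
-- (seeded with one copy of each candidate char of lst[0]) and taking its longest run — no counts.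

-- ===== PORT A =====
-- Literal port of A. Python strings are handled as List Char; `l[i]` is `l.toList.getD i ' '`
-- (Pre_hTol guarantees i is in range, where Python would otherwise raise IndexError).
-- The inner `for j in range(ln)` loop, which conditionally bumps pair[j][1][i] for every j,
-- is rendered as a map over the pair list (pair has exactly ln elements).
def hTol (lst : List String) : String :=
  let first := (lst.headD "").toList                       -- lst[0]; Pre_hTol requires lst ≠ []
  let ln := first.length
  let rank : List (List Nat) :=
    ((List.range ln).foldl (fun r _ => r ++ [([] : List Nat)]) []).map
      (fun l => (List.range ln).foldl (fun l _ => l ++ [(0 : Nat)]) l)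
  let pair0 : List (Char × List Nat) := (PySem.List.sorted first (fun c => c)).zip rank
  let pair := lst.foldl (fun pair l =>
      (List.range ln).foldl (fun pair i =>
        pair.map (fun p =>
          if l.toList.getD i ' ' = p.1 then (p.1, p.2.set i (p.2.getD i 0 + 1)) else p)) pair) pair0
  let result := (List.range ln).foldl (fun res i =>
      let maxE := (List.range' 1 (ln - 1)).foldl (fun maxE j =>   -- range(1, ln)
          if (pair.getD j (' ', [])).2.getD i 0 > (pair.getD maxE (' ', [])).2.getD i 0
          then j else maxE) 0
      res ++ [(pair.getD maxE (' ', [])).1]) []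
  String.ofList result

-- ===== PORT B =====
-- Literal port of Source B: per column sort the candidate characters (one seed copy of each
-- candidate plus the column entries that are candidates) and scan for the longest run.
-- The scan state (cur, cur_len, best, best_len) of Source B's for-loop body:
def pvScanStep (st : Char × Nat × Char × Nat) (ch : Char) : Char × Nat × Char × Nat :=
  let cur := if ch = st.1 then st.1 else ch
  let curLen := if ch = st.1 then st.2.1 + 1 else 1
  if curLen > st.2.2.2 then (cur, curLen, cur, curLen) else (cur, curLen, st.2.2.1, st.2.2.2)

def hTol_alt (lst : List String) : String :=
  let first := (lst.headD "").toList                       -- lst[0]; Pre_hTol requires lst ≠ []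
  let cand := PySem.List.sorted (PySem.Set.ofList first) (fun c => c)   -- sorted(set(lst[0]))
  let out := (List.range first.length).foldl (fun out i =>
      let col := PySem.List.sorted
        (cand ++ (lst.map (fun row => row.toList.getD i ' ')).filter (fun c => decide (c ∈ cand)))
        (fun c => c)
      -- col[0]: col is nonempty whenever the loop body runs (cand ≠ [] since lst[0] ≠ "")
      let r := col.foldl pvScanStep (col.headD ' ', 0, col.headD ' ', 0)
      out ++ [r.2.2.1]) []
  String.ofList out

-- ===== PRECONDITION & SPEC =====
-- Pre_ excludes exactly the inputs where Python A raises IndexError: the empty list, and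
-- lists in which some row is shorter than the first row (both A and B index row[i] there).
def Pre_hTol (lst : List String) : Prop :=
  lst ≠ [] ∧ ∀ s ∈ lst, (lst.headD "").toList.length ≤ s.toList.length
instance (lst : List String) : Decidable (Pre_hTol lst) := by unfold Pre_hTol; infer_instance
def pvWitness_hTol : List String := ["baab", "zaz!", "bzb!"]

def Spec_hTol (lst : List String) (out : String) : Prop := out = hTol_alt lst
instance (lst : List String) (out : String) : Decidable (Spec_hTol lst out) := by unfold Spec_hTol; infer_instance

-- ===== CLAIM (what is proved, stated in full; the proofs are below) =====
def Claim_equal_hTol : Prop := ∀ (lst : List String), Dom_hTol lst → Pre_hTol lst → Spec_hTol lst (hTol lst)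

-- ===== LEMMAS AND PROOFS =====

-- the number of rows whose i-th character is c (the per-column count A accumulates)
def pvCnt (lst : List String) (i : Nat) (c : Char) : Nat :=
  lst.countP (fun l => decide (l.toList.getD i ' ' = c))

theorem pv_foldl_app {α : Type} (x : α) : ∀ (n : Nat) (acc : List α),
    (List.range n).foldl (fun r _ => r ++ [x]) acc = acc ++ List.replicate n x := by
  intro n
  induction n with
  | zero => simp
  | succ m ih => intro acc; simp [List.range_succ, List.foldl_append, ih, List.replicate_succ']

theorem pv_zip_rep {α β : Type} (z : β) : ∀ (s : List α),
    s.zip (List.replicate s.length z) = s.map (fun c => (c, z)) := by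
  intro s; induction s with
  | nil => simp
  | cons a t ih => simp [List.replicate_succ, ih]

theorem pv_foldl_map {α ι : Type} (u : ι → α → α) : ∀ (is : List ι) (l : List α),
    is.foldl (fun p i => p.map (u i)) l = l.map (fun x => is.foldl (fun y i => u i y) x) := by
  intro is
  induction is with
  | nil => simp
  | cons i t ih => intro l; simp only [List.foldl_cons, ih, List.map_map]; rfl

theorem pv_prod_snd (l : String) (c : Char) : ∀ (is : List Nat) (cs : List Nat),
    is.foldl (fun (p : Char × List Nat) i =>
        if l.toList.getD i ' ' = p.1 then (p.1, p.2.set i (p.2.getD i 0 + 1)) else p) (c, cs)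
      = (c, is.foldl (fun cs i =>
            if l.toList.getD i ' ' = c then cs.set i (cs.getD i 0 + 1) else cs) cs) := by
  intro is
  induction is with
  | nil => simp
  | cons i t ih =>
    intro cs
    simp only [List.foldl_cons]
    by_cases h : l.toList.getD i ' ' = c
    · rw [if_pos h, if_pos h]; exact ih _
    · rw [if_neg h, if_neg h]; exact ih _

theorem pv_set_map_range (n i : Nat) (g : Nat → Nat) (v : Nat) (_h : i < n) :
    ((List.range n).map g).set i v = (List.range n).map (fun j => if j = i then v else g j) := by
  apply List.ext_getElem
  · simp
  · intro k h1 h2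
    simp only [List.getElem_set, List.getElem_map, List.getElem_range]
    by_cases hk : k = i
    · simp [hk]
    · simp [hk]; exact fun h' => absurd h'.symm hk

theorem pv_fill (n : Nat) (P : Nat → Prop) [DecidablePred P] :
    ∀ (is : List Nat) (g : Nat → Nat), (∀ j ∈ is, j < n) →
    is.foldl (fun cs i => if P i then cs.set i (cs.getD i 0 + 1) else cs) ((List.range n).map g)
      = (List.range n).map (fun i => g i + if P i then is.count i else 0) := by
  intro is
  induction is with
  | nil => simp
  | cons i t ih =>
    intro g hb
    have hi : i < n := hb i (by simp)
    simp only [List.foldl_cons]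
    by_cases hP : P i
    · rw [if_pos hP, PySem.List.getD_map_range g n i 0 hi, pv_set_map_range n i g _ hi]
      have step : (List.range n).map (fun j => if j = i then g i + 1 else g j)
          = (List.range n).map (fun j => (fun j => if j = i then g j + 1 else g j) j) := by
        apply List.map_congr_left
        intro x hx
        by_cases hxi : x = i <;> simp [hxi]
      rw [step, ih (fun j => if j = i then g j + 1 else g j) (fun j hj => hb j (by simp [hj]))]
      apply List.map_congr_left
      intro x hx
      by_cases hxi : x = i
      · subst hxi
        simp [hP]
        omega
      · simp only [List.count_cons]
        have : ¬ (i = x) := fun h' => absurd h'.symm hxi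
        simp [this, hxi]
    · rw [if_neg hP, ih g (fun j hj => hb j (by simp [hj]))]
      apply List.map_congr_left
      intro x hx
      by_cases hPx : P x
      · simp [hPx, List.count_cons]
        intro h'
        subst h'
        exact absurd hPx hP
      · simp [hPx]

theorem pv_row (n : Nat) (P : Nat → Prop) [DecidablePred P] (g : Nat → Nat) :
    (List.range n).foldl (fun cs i => if P i then cs.set i (cs.getD i 0 + 1) else cs)
        ((List.range n).map g)
      = (List.range n).map (fun i => g i + if P i then 1 else 0) := by
  rw [pv_fill n P (List.range n) g (fun j hj => List.mem_range.mp hj)]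
  apply List.map_congr_left
  intro x hx
  rw [List.count_eq_one_of_mem List.nodup_range hx]

theorem pv_evolve (n : Nat) (c : Char) : ∀ (lst : List String) (g : Nat → Nat),
    lst.foldl (fun p l =>
        (List.range n).foldl (fun cs i =>
          if l.toList.getD i ' ' = c then cs.set i (cs.getD i 0 + 1) else cs) p)
      ((List.range n).map g)
      = (List.range n).map (fun i => g i + pvCnt lst i c) := by
  intro lst
  induction lst with
  | nil => simp [pvCnt]
  | cons l ls ih =>
    intro g
    simp only [List.foldl_cons]
    rw [pv_row n (fun i => l.toList.getD i ' ' = c) g, ih]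
    apply List.map_congr_left
    intro x hx
    simp only [pvCnt, List.countP_cons]
    by_cases h : l.toList.getD x ' ' = c <;> simp [h] <;> omega

theorem pv_getD_map {α β : Type} (f : α → β) (s : List α) (j : Nat) (d : β) (d' : α)
    (hlt : j < s.length) : (s.map f).getD j d = f (s.getD j d') := by
  rw [List.getD_eq_getElem _ _ (by simpa using hlt), List.getD_eq_getElem _ _ hlt, List.getElem_map]

theorem pv_argmax (s : List Char) (F : Nat → Nat) (f : Char → Nat) (d : Char)
    (hF : ∀ j, j < s.length → F j = f (s.getD j d)) :
    ∀ (t : List Nat) (acc : Nat), acc < s.length → (∀ j ∈ t, j < s.length) →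
    (t.foldl (fun m j => if F j > F m then j else m) acc) < s.length ∧
    s.getD (t.foldl (fun m j => if F j > F m then j else m) acc) d
      = (t.map (fun j => s.getD j d)).foldl (fun b c => if f c > f b then c else b)
          (s.getD acc d) := by
  intro t
  induction t with
  | nil => intro acc h _; exact ⟨h, rfl⟩
  | cons j t ih =>
    intro acc hacc hb
    have hj : j < s.length := hb j (by simp)
    simp only [List.foldl_cons, List.map_cons]
    have hcond : (F j > F acc) = (f (s.getD j d) > f (s.getD acc d)) := by
      rw [hF j hj, hF acc hacc]
    by_cases h : F j > F acc
    · have h' : f (s.getD j d) > f (s.getD acc d) := by rw [← hcond]; exact h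
      rw [if_pos h, if_pos h']
      exact ih j hj (fun x hx => hb x (by simp [hx]))
    · have h' : ¬ f (s.getD j d) > f (s.getD acc d) := by rw [← hcond]; exact h
      rw [if_neg h, if_neg h']
      exact ih acc hacc (fun x hx => hb x (by simp [hx]))

theorem pv_range_map_tail (s : List Char) (d : Char) :
    (List.range' 1 (s.length - 1)).map (fun j => s.getD j d) = s.tail := by
  apply List.ext_getElem
  · simp
  · intro k h1 h2
    simp only [List.getElem_map, List.getElem_range', List.getElem_tail]
    rw [List.getD_eq_getElem _ _ (by simp at h2 ⊢; omega)]
    congr 1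
    omega

theorem pv_fm_spec (k : Char → Nat) :
    ∀ (t : List Char) (b : Char), List.Pairwise (fun a b => a ≤ b) (b :: t) →
    (t.foldl (fun b c => if k b < k c then c else b) b) ∈ b :: t ∧
    (∀ y ∈ b :: t, k y ≤ k (t.foldl (fun b c => if k b < k c then c else b) b)) ∧
    (∀ y ∈ b :: t, k y = k (t.foldl (fun b c => if k b < k c then c else b) b) →
        (t.foldl (fun b c => if k b < k c then c else b) b) ≤ y) := by
  intro t
  induction t with
  | nil =>
    intro b _
    refine ⟨by simp, ?_, ?_⟩
    · intro y hy; simp at hy; subst hy; exact le_refl _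
    · intro y hy _; simp at hy; subst hy; exact le_refl _
  | cons c t ih =>
    intro b hp
    have hbc : b ≤ c := (List.pairwise_cons.mp hp).1 c (by simp)
    have hbt : ∀ y ∈ t, b ≤ y := fun y hy => (List.pairwise_cons.mp hp).1 y (by simp [hy])
    have hct : List.Pairwise (fun a b => a ≤ b) (c :: t) := (List.pairwise_cons.mp hp).2
    set b' := if k b < k c then c else b with hb'
    have hp' : List.Pairwise (fun a b => a ≤ b) (b' :: t) := by
      rw [List.pairwise_cons]
      refine ⟨?_, (List.pairwise_cons.mp hct).2⟩
      intro y hy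
      by_cases h : k b < k c
      · simp only [hb', if_pos h]; exact (List.pairwise_cons.mp hct).1 y hy
      · simp only [hb', if_neg h]; exact hbt y hy
    obtain ⟨hmem, hmax, hmin⟩ := ih b' hp'
    simp only [List.foldl_cons]
    rw [← hb']
    set r := t.foldl (fun b c => if k b < k c then c else b) b' with hr
    have hkb : k b ≤ k b' := by
      by_cases h : k b < k c
      · simp only [hb', if_pos h]; exact le_of_lt h
      · simp only [hb', if_neg h]; exact le_refl _
    have hkc : k c ≤ k b' := by
      by_cases h : k b < k c
      · simp only [hb', if_pos h]; exact le_refl _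
      · simp only [hb', if_neg h]; exact le_of_not_gt h
    have hb'max : k b' ≤ k r := hmax b' (by simp)
    refine ⟨?_, ?_, ?_⟩
    · rcases List.mem_cons.mp hmem with h | h
      · by_cases hc : k b < k c
        · rw [h, hb', if_pos hc]; simp
        · rw [h, hb', if_neg hc]; simp
      · simp [h]
    · intro y hy
      rcases List.mem_cons.mp hy with h | hy
      · subst h; exact le_trans hkb hb'max
      · rcases List.mem_cons.mp hy with h | hy
        · subst h; exact le_trans hkc hb'max
        · exact hmax y (by simp [hy])
    · intro y hy hky
      rcases List.mem_cons.mp hy with h | hy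
      · rw [h] at hky ⊢
        by_cases hc : k b < k c
        · exfalso
          have : k b < k r := lt_of_lt_of_le (lt_of_lt_of_le hc hkc) hb'max
          rw [hky] at this; exact lt_irrefl _ this
        · have hb'b : b' = b := by rw [hb', if_neg hc]
          exact hmin b (by rw [← hb'b]; simp) (by rw [← hb'b] at hky ⊢; exact hky)
      · rcases List.mem_cons.mp hy with h | hy
        · rw [h] at hky ⊢
          by_cases hc : k b < k c
          · have hb'c : b' = c := by rw [hb', if_pos hc]
            exact hmin c (by rw [← hb'c]; simp) hky
          · have hb'b : b' = b := by rw [hb', if_neg hc]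
            rcases lt_or_eq_of_le hb'max with hlt | heq
            · exfalso
              have : k c < k r := lt_of_le_of_lt hkc hlt
              rw [hky] at this; exact lt_irrefl _ this
            · have hrb : r ≤ b := le_of_le_of_eq (hmin b' (by simp) heq) hb'b
              exact le_trans hrb hbc
        · exact hmin y (by simp [hy]) hky

theorem pv_pair_fold (n : Nat) (c : Char) : ∀ (lst : List String) (cs : List Nat),
    lst.foldl (fun p l =>
        (List.range n).foldl (fun (p : Char × List Nat) i =>
          if l.toList.getD i ' ' = p.1 then (p.1, p.2.set i (p.2.getD i 0 + 1)) else p) p) (c, cs)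
      = (c, lst.foldl (fun cs l =>
            (List.range n).foldl (fun cs i =>
              if l.toList.getD i ' ' = c then cs.set i (cs.getD i 0 + 1) else cs) cs) cs) := by
  intro lst
  induction lst with
  | nil => intro cs; rfl
  | cons l ls ih =>
    intro cs
    simp only [List.foldl_cons]
    rw [pv_prod_snd l c (List.range n) cs, ih]

theorem pv_pair_closed (lst : List String) (first : List Char) :
    lst.foldl (fun pair l =>
        (List.range first.length).foldl (fun pair i =>
          pair.map (fun p =>
            if l.toList.getD i ' ' = p.1 then (p.1, p.2.set i (p.2.getD i 0 + 1)) else p)) pair)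
      ((PySem.List.sorted first (fun c => c)).zip
        (((List.range first.length).foldl (fun r _ => r ++ [([] : List Nat)]) []).map
          (fun l => (List.range first.length).foldl (fun l _ => l ++ [(0 : Nat)]) l)))
      = (PySem.List.sorted first (fun c => c)).map
          (fun c => (c, (List.range first.length).map (fun i => pvCnt lst i c))) := by
  set n := first.length with hn
  set s := PySem.List.sorted first (fun c => c) with hs
  have hslen : s.length = n := by rw [hs, PySem.List.length_sorted]
  have hrank : ((List.range n).foldl (fun r _ => r ++ [([] : List Nat)]) []).map
      (fun l => (List.range n).foldl (fun l _ => l ++ [(0 : Nat)]) l)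
      = List.replicate n ((List.range n).map (fun _ => (0 : Nat))) := by
    rw [pv_foldl_app ([] : List Nat) n []]
    simp only [List.nil_append, List.map_replicate]
    rw [pv_foldl_app (0 : Nat) n []]
    simp [List.map_const']
  rw [hrank, ← hslen, pv_zip_rep, hslen]
  have hinner : (fun (pair : List (Char × List Nat)) (l : String) =>
      (List.range n).foldl (fun pair i =>
        pair.map (fun p =>
          if l.toList.getD i ' ' = p.1 then (p.1, p.2.set i (p.2.getD i 0 + 1)) else p)) pair)
      = (fun pair l => pair.map (fun x => (List.range n).foldl (fun (p : Char × List Nat) i =>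
          if l.toList.getD i ' ' = p.1 then (p.1, p.2.set i (p.2.getD i 0 + 1)) else p) x)) := by
    funext pair l
    exact pv_foldl_map _ (List.range n) pair
  rw [hinner, pv_foldl_map, List.map_map]
  apply List.map_congr_left
  intro c hc
  simp only [Function.comp_apply]
  rw [pv_pair_fold n c lst, pv_evolve n c lst (fun _ => 0)]
  simp

-- ----- B-side: the longest-run scan over a sorted list returns the smallest most-frequent char

def pvInv (p : List Char) (st : Char × Nat × Char × Nat) : Prop :=
  st.1 ∈ p ∧ (∀ y ∈ p, y ≤ st.1) ∧ st.2.1 = p.count st.1 ∧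
  st.2.2.1 ∈ p ∧ st.2.2.2 = p.count st.2.2.1 ∧
  (∀ y ∈ p, p.count y ≤ st.2.2.2) ∧ (∀ y ∈ p, p.count y = st.2.2.2 → st.2.2.1 ≤ y)

theorem pv_count_append_one (p : List Char) (ch y : Char) :
    (p ++ [ch]).count y = p.count y + if y = ch then 1 else 0 := by
  rcases eq_or_ne y ch with h | h
  · subst h; simp [List.count_append]
  · simp [List.count_append, h, h.symm]

theorem pv_mem_app_ne {p : List Char} {ch y : Char} (hy : y ∈ p ++ [ch]) (h : ¬ y = ch) :
    y ∈ p := by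
  rcases List.mem_append.mp hy with h' | h'
  · exact h'
  · simp at h'; exact absurd h' h

theorem pvInv_def (p : List Char) (cur : Char) (curLen : Nat) (best : Char) (bestLen : Nat) :
    pvInv p (cur, curLen, best, bestLen) =
      (cur ∈ p ∧ (∀ y ∈ p, y ≤ cur) ∧ curLen = p.count cur ∧
       best ∈ p ∧ bestLen = p.count best ∧
       (∀ y ∈ p, p.count y ≤ bestLen) ∧ (∀ y ∈ p, p.count y = bestLen → best ≤ y)) := rfl

theorem pvInv_step (p : List Char) (ch : Char) (st : Char × Nat × Char × Nat)
    (hpw : (p ++ [ch]).Pairwise (· ≤ ·)) (h : pvInv p st) :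
    pvInv (p ++ [ch]) (pvScanStep st ch) := by
  obtain ⟨cur, curLen, best, bestLen⟩ := st
  rw [pvInv_def] at h
  obtain ⟨hcm, hcmax, hcl, hbm, hbl, hmax, hmin⟩ := h
  have hle : ∀ y ∈ p, y ≤ ch := by
    intro y hy
    exact (List.pairwise_append.mp hpw).2.2 y hy ch (by simp)
  have hbestle : best ≤ ch := hle _ hbm
  have hmemapp : ∀ y ∈ p ++ [ch], y ≤ ch := by
    intro y hy
    rcases List.mem_append.mp hy with hy | hy
    · exact hle y hy
    · simp at hy; subst hy; exact le_refl _
  by_cases hc : ch = cur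
  · -- run continues
    have hcl' : curLen + 1 = (p ++ [ch]).count cur := by
      rw [pv_count_append_one]
      simp [hcl, hc.symm]
    by_cases hgt : curLen + 1 > bestLen
    · have hstep : pvScanStep (cur, curLen, best, bestLen) ch
          = (cur, curLen + 1, cur, curLen + 1) := by
        simp [pvScanStep, hc, hgt]
      rw [hstep, pvInv_def]
      refine ⟨List.mem_append_left _ hcm, ?_, hcl', List.mem_append_left _ hcm, hcl', ?_, ?_⟩
      · intro y hy; exact le_of_le_of_eq (hmemapp y hy) hc
      · intro y hy
        rcases eq_or_ne y cur with hyc | hyc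
        · rw [hyc, ← hcl']
        · have hne : ¬ y = ch := fun he => hyc (he.trans hc)
          rw [pv_count_append_one]
          simp only [hne, if_false, add_zero]
          have := hmax y (pv_mem_app_ne hy hne)
          omega
      · intro y hy hcnt
        rcases eq_or_ne y cur with hyc | hyc
        · rw [hyc]
        · exfalso
          have hne : ¬ y = ch := fun he => hyc (he.trans hc)
          rw [pv_count_append_one] at hcnt
          simp only [hne, if_false, add_zero] at hcnt
          have := hmax y (pv_mem_app_ne hy hne)
          omega
    · have hstep : pvScanStep (cur, curLen, best, bestLen) ch
          = (cur, curLen + 1, best, bestLen) := by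
        simp [pvScanStep, hc, hgt]
      rw [hstep, pvInv_def]
      have hbne : ¬ best = ch := by
        intro he
        rw [he, hc] at hbl
        omega
      refine ⟨List.mem_append_left _ hcm, ?_, hcl', List.mem_append_left _ hbm, ?_, ?_, ?_⟩
      · intro y hy; exact le_of_le_of_eq (hmemapp y hy) hc
      · rw [pv_count_append_one]; simp [hbne, hbl]
      · intro y hy
        rcases eq_or_ne y ch with hyc | hyc
        · have h1 : List.count ch (p ++ [ch]) = List.count cur (p ++ [ch]) := by rw [hc]
          rw [hyc, h1, ← hcl']; omega
        · rw [pv_count_append_one]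
          simp only [hyc, if_false, add_zero]
          exact hmax y (pv_mem_app_ne hy hyc)
      · intro y hy hcnt
        rcases eq_or_ne y ch with hyc | hyc
        · rw [hyc]; exact hbestle
        · rw [pv_count_append_one] at hcnt
          simp only [hyc, if_false, add_zero] at hcnt
          exact hmin y (pv_mem_app_ne hy hyc) hcnt
  · -- new run starts
    have hchnp : ch ∉ p := by
      intro hin
      exact hc (le_antisymm (hcmax ch hin) (hle cur hcm))
    have hposb : 0 < bestLen := by
      rw [hbl]; exact List.count_pos_iff.mpr hbm
    have hgt : ¬ (1 > bestLen) := by omega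
    have hbne : ¬ best = ch := fun he => hchnp (he ▸ hbm)
    have hstep : pvScanStep (cur, curLen, best, bestLen) ch
        = (ch, 1, best, bestLen) := by
      simp [pvScanStep, hc, hgt]
    rw [hstep, pvInv_def]
    refine ⟨List.mem_append_right _ (by simp), hmemapp, ?_,
        List.mem_append_left _ hbm, ?_, ?_, ?_⟩
    · rw [pv_count_append_one]
      simp [List.count_eq_zero_of_not_mem hchnp]
    · rw [pv_count_append_one]; simp [hbne, hbl]
    · intro y hy
      rcases eq_or_ne y ch with hyc | hyc
      · rw [hyc, pv_count_append_one]
        simp [List.count_eq_zero_of_not_mem hchnp]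
        omega
      · rw [pv_count_append_one]
        simp only [hyc, if_false, add_zero]
        exact hmax y (pv_mem_app_ne hy hyc)
    · intro y hy hcnt
      rcases eq_or_ne y ch with hyc | hyc
      · rw [hyc]; exact hbestle
      · rw [pv_count_append_one] at hcnt
        simp only [hyc, if_false, add_zero] at hcnt
        exact hmin y (pv_mem_app_ne hy hyc) hcnt

theorem pvScan_fold : ∀ (rest p : List Char) (st : Char × Nat × Char × Nat),
    (p ++ rest).Pairwise (· ≤ ·) → pvInv p st →
    pvInv (p ++ rest) (rest.foldl pvScanStep st) := by
  intro rest
  induction rest with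
  | nil => intro p st _ h; simpa using h
  | cons ch rest' ih =>
    intro p st hpw h
    have hassoc : p ++ ch :: rest' = (p ++ [ch]) ++ rest' := by simp
    rw [hassoc] at hpw ⊢
    simp only [List.foldl_cons]
    apply ih (p ++ [ch]) (pvScanStep st ch) hpw
    apply pvInv_step p ch st _ h
    have hsub : List.Sublist (p ++ [ch]) ((p ++ [ch]) ++ rest') :=
      List.sublist_append_left _ _
    exact hpw.sublist hsub

theorem pvScan_winner (c0 : Char) (rest : List Char)
    (hpw : (c0 :: rest).Pairwise (· ≤ ·)) :
    pvInv (c0 :: rest) ((c0 :: rest).foldl pvScanStep (c0, 0, c0, 0)) := by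
  have hstep : pvScanStep (c0, 0, c0, 0) c0 = (c0, 1, c0, 1) := by
    simp [pvScanStep]
  have hinv1 : pvInv [c0] (c0, 1, c0, 1) := by
    refine ⟨by simp, ?_, by simp, by simp, by simp, ?_, ?_⟩
    · intro y hy; simp at hy; subst hy; exact le_refl _
    · intro y hy; simp at hy; subst hy; simp
    · intro y hy _; simp at hy; subst hy; exact le_refl _
  have h2 := pvScan_fold rest [c0] (c0, 1, c0, 1) (by simpa using hpw) hinv1
  rw [List.foldl_cons, hstep]
  simpa using h2

-- counts in B's column list: every candidate char x has count 1 + pvCnt lst i x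
theorem pv_col_count (lst : List String) (first : List Char) (i : Nat)
    (cand : List Char) (hcand : cand = PySem.List.sorted (PySem.Set.ofList first) (fun c => c))
    (x : Char) (hx : x ∈ cand) :
    (PySem.List.sorted
      (cand ++ (lst.map (fun row => row.toList.getD i ' ')).filter (fun c => decide (c ∈ cand)))
      (fun c => c)).count x
    = 1 + pvCnt lst i x := by
  have hperm := PySem.List.sorted_perm
    (cand ++ (lst.map (fun row => row.toList.getD i ' ')).filter (fun c => decide (c ∈ cand)))
    (fun c => c) false
  rw [hperm.count_eq, List.count_append]
  have hnodup : cand.Nodup := by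
    rw [hcand]
    exact (PySem.List.sorted_ofList_pairwise_lt first).imp (fun h => ne_of_lt h)
  rw [List.count_eq_one_of_mem hnodup hx]
  congr 1
  rw [List.count_filter (by simp [hx])]
  rw [List.count_eq_countP, List.countP_map, pvCnt]
  apply List.countP_congr
  intro l _
  simp [Function.comp]

theorem pv_mem_col (lst : List String) (first : List Char) (i : Nat)
    (cand : List Char) (hcand : cand = PySem.List.sorted (PySem.Set.ofList first) (fun c => c))
    (x : Char) :
    (x ∈ PySem.List.sorted
      (cand ++ (lst.map (fun row => row.toList.getD i ' ')).filter (fun c => decide (c ∈ cand)))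
      (fun c => c)) ↔ x ∈ first := by
  rw [PySem.List.mem_sorted, List.mem_append]
  constructor
  · rintro (h | h)
    · rw [hcand, PySem.List.mem_sorted, PySem.Set.mem_ofList] at h; exact h
    · have := (List.mem_filter.mp h).2
      simp at this
      rw [hcand, PySem.List.mem_sorted, PySem.Set.mem_ofList] at this
      exact this
  · intro h
    left
    rw [hcand, PySem.List.mem_sorted, PySem.Set.mem_ofList]
    exact h

-- the per-column characters produced by A and B coincide
theorem pv_pick_eq (lst : List String) (first : List Char) (i : Nat) (hi : i < first.length)
    (s : List Char) (hs : s = PySem.List.sorted first (fun c => c))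
    (pair : List (Char × List Nat))
    (hpair : pair = s.map (fun c => (c, (List.range first.length).map (fun i => pvCnt lst i c)))) :
    (pair.getD ((List.range' 1 (first.length - 1)).foldl (fun maxE j =>
        if (pair.getD j (' ', [])).2.getD i 0 > (pair.getD maxE (' ', [])).2.getD i 0
        then j else maxE) 0) (' ', [])).1
    = (let cand := PySem.List.sorted (PySem.Set.ofList first) (fun c => c)
       let col := PySem.List.sorted
         (cand ++ (lst.map (fun row => row.toList.getD i ' ')).filter (fun c => decide (c ∈ cand)))
         (fun c => c)
       (col.foldl pvScanStep (col.headD ' ', 0, col.headD ' ', 0)).2.2.1) := by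
  set n := first.length with hn
  have hslen : s.length = n := by rw [hs, PySem.List.length_sorted]
  have hnpos : 0 < n := by omega
  set f : Char → Nat := fun c => pvCnt lst i c with hf
  -- ===== A side: its column char is the ≤-least count-maximal char of first =====
  have hF : ∀ j, j < s.length → (pair.getD j (' ', [])).2.getD i 0 = f (s.getD j ' ') := by
    intro j hj
    rw [hpair, pv_getD_map _ s j (' ', []) ' ' hj]
    exact PySem.List.getD_map_range _ n i 0 hi
  have hrange : ∀ j ∈ List.range' 1 (n - 1), j < s.length := by
    intro j hj
    rw [hslen]
    have := List.mem_range'_1.mp hj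
    omega
  obtain ⟨hlt, hval⟩ := pv_argmax s (fun j => (pair.getD j (' ', [])).2.getD i 0) f ' '
      (fun j hj => hF j hj) (List.range' 1 (n - 1)) 0 (by rw [hslen]; omega) hrange
  have hfst : (pair.getD ((List.range' 1 (n - 1)).foldl (fun maxE j =>
      if (pair.getD j (' ', [])).2.getD i 0 > (pair.getD maxE (' ', [])).2.getD i 0
      then j else maxE) 0) (' ', [])).1
      = s.getD ((List.range' 1 (n - 1)).foldl (fun maxE j =>
      if (pair.getD j (' ', [])).2.getD i 0 > (pair.getD maxE (' ', [])).2.getD i 0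
      then j else maxE) 0) ' ' := by
    rw [hpair] at hlt ⊢
    rw [pv_getD_map _ s _ (' ', []) ' ' hlt]
  rw [hfst, hval]
  rw [show n - 1 = s.length - 1 by rw [hslen], pv_range_map_tail s ' ']
  cases hsc : s with
  | nil => rw [hsc] at hslen; simp at hslen; omega
  | cons b t =>
    have hpw : List.Pairwise (fun a b => a ≤ b) (b :: t) := by
      rw [← hsc, hs]
      have := PySem.List.sorted_pairwise first (fun c => c)
      simpa using this
    simp only [List.getD_cons_zero, List.tail_cons]
    have hA := pv_fm_spec f t b hpw
    have hgt : (fun (bb cc : Char) => if f cc > f bb then cc else bb)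
        = (fun bb cc => if f bb < f cc then cc else bb) := rfl
    rw [hgt]
    set rA := t.foldl (fun bb cc => if f bb < f cc then cc else bb) b with hrA
    obtain ⟨hAmem, hAmax, hAmin⟩ := hA
    rw [← hsc] at hAmem hAmax hAmin
    have hmems : ∀ y, y ∈ s ↔ y ∈ first := by
      intro y
      rw [hs, PySem.List.mem_sorted]
    -- ===== B side =====
    set cand := PySem.List.sorted (PySem.Set.ofList first) (fun c => c) with hcand
    set col := PySem.List.sorted
      (cand ++ (lst.map (fun row => row.toList.getD i ' ')).filter (fun c => decide (c ∈ cand)))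
      (fun c => c) with hcol
    have hmemcol : ∀ x, x ∈ col ↔ x ∈ first := fun x =>
      pv_mem_col lst first i cand hcand x
    have hcandmem : ∀ x, x ∈ cand ↔ x ∈ first := by
      intro x
      rw [hcand, PySem.List.mem_sorted, PySem.Set.mem_ofList]
    have hcount : ∀ x ∈ col, col.count x = 1 + f x := by
      intro x hx
      exact pv_col_count lst first i cand hcand x
        ((hcandmem x).mpr ((hmemcol x).mp hx))
    have hcolpw : col.Pairwise (· ≤ ·) := by
      have := PySem.List.sorted_pairwise
        (cand ++ (lst.map (fun row => row.toList.getD i ' ')).filter (fun c => decide (c ∈ cand)))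
        (fun c => c)
      simpa [hcol] using this
    have hcolne : col ≠ [] := by
      intro hnil
      have hbf : b ∈ first := (hmems b).mp (by rw [hsc]; simp)
      have : b ∈ col := (hmemcol b).mpr hbf
      rw [hnil] at this
      exact absurd this (List.not_mem_nil)
    cases hcc : col with
    | nil => exact absurd hcc hcolne
    | cons c0 rest =>
      have hpwc : (c0 :: rest).Pairwise (· ≤ ·) := by rw [← hcc]; exact hcolpw
      rw [hcc] at hmemcol hcount
      simp only [List.headD_cons]
      have hinv := pvScan_winner c0 rest hpwc
      obtain ⟨_, _, _, hBmem, hBlen, hBmax, hBmin⟩ := hinv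
      set rB := (List.foldl pvScanStep (c0, 0, c0, 0) (c0 :: rest)).2.2.1 with hrB
      -- rB and rA are both the ≤-least f-maximal member of first
      have hrBf : rB ∈ first := (hmemcol rB).mp hBmem
      have hrAc : rA ∈ c0 :: rest := (hmemcol rA).mpr ((hmems rA).mp hAmem)
      have hfeq : f rA = f rB := by
        have h1 : f rB ≤ f rA := hAmax rB ((hmems rB).mpr hrBf)
        have h2 : (c0 :: rest).count rA ≤ (c0 :: rest).count rB := by
          rw [← hBlen]; exact hBmax rA hrAc
        rw [hcount rA hrAc, hcount rB hBmem] at h2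
        omega
      have hle1 : rA ≤ rB := hAmin rB ((hmems rB).mpr hrBf) hfeq.symm
      have hle2 : rB ≤ rA := by
        apply hBmin rA hrAc
        rw [hBlen, hcount rA hrAc, hcount rB hBmem, hfeq]
      exact le_antisymm hle1 hle2

theorem pv_main (lst : List String) : hTol lst = hTol_alt lst := by
  unfold hTol hTol_alt
  set first := (lst.headD "").toList with hfirst
  simp only []
  rw [pv_pair_closed lst first]
  rw [PySem.List.foldl_append_singleton_eq_map, PySem.List.foldl_append_singleton_eq_map]
  simp only [List.nil_append]
  congr 1
  apply List.map_congr_left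
  intro i hi
  have hi' : i < first.length := List.mem_range.mp hi
  exact pv_pick_eq lst first i hi' _ rfl _ rfl

-- ===== VERDICT (by name: the statement is the Claim_ definition above) =====
theorem hTol_spec : Claim_equal_hTol := by
  intro lst _ _
  show hTol lst = hTol_alt lst
  exact pv_main lst
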